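-- pv_equiv track=rewrite | github.com/bhaveshgoyal27/DSA-Collection | 2-pointer/least_consecutive_cards_to_match.py | least_consecutive_cards_to_match
-- ===== SOURCE A (Python) =====
-- import math
--
-- def least_consecutive_cards_to_match(cards: list[int]) -> int:
--     # WRITE YOUR BRILLIANT CODE HERE
--     window = set()
--     minl = math.inf
--     left = 0
--     for right in range(len(cards)):
--         while cards[right] in window:
--             window.remove(cards[left])
--             minl = min(minl, right - left + 1)
--             left += 1
--         window.add(cards[right])
--
--     return minl if minl != math.inf else -1
-- ===== SOURCE B (Python) =====
-- def least_consecutive_cards_to_match(cards: list[int]) -> int: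
--     # Single pass with a last-seen index per value; no sliding window needed,
--     # since the minimal window always ends at a value's next occurrence.
--     last = {}
--     best = None
--     for i in range(len(cards)):
--         c = cards[i]
--         if c in last:
--             gap = i - last[c] + 1
--             if best is None or gap < best:
--                 best = gap
--         last[c] = i
--     return -1 if best is None else best
-- ===== Notes on version B (the rewrite author's own statement) =====
-- stated objective: simpler
-- what changed: Replaces the two-pointer sliding window (set membership, inner while-loop shrinking the window) by a single pass that keeps each value's last-seen index in a dict and minimises the gap to the previous occurrence.
import Mathlib
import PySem

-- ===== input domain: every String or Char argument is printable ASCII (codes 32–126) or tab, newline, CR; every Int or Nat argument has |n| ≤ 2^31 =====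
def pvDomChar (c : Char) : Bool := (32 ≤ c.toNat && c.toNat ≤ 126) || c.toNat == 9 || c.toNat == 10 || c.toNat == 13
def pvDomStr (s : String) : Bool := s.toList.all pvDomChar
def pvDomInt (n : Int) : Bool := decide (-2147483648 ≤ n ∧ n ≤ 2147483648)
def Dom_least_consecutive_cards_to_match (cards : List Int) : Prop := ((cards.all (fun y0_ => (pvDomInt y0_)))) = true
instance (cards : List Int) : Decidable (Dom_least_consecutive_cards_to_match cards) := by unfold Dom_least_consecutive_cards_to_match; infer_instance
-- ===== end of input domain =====

-- B replaces A's two-pointer sliding window by a single pass tracking each value's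
-- last-seen index in a dict; same return value, simpler control flow.

-- ===== PORT A =====
-- minl = min(minl, v), with minl : Option Int (none = math.inf)
def pvMinOpt (m : Option Int) (v : Int) : Option Int :=
  some (match m with | none => v | some b => min b v)

-- the inner 'while cards[right] in window' loop; fuel r+1 always suffices (left ≤ right).
-- The 'none' branch of remove? is Python's KeyError; it is unreachable (cards[left] is
-- always in the window when the loop body runs).
def pvShrink (cards : List Int) (r : Nat) :
    Nat → PySem.Set Int → Nat → Option Int → (PySem.Set Int × Nat × Option Int)
  | 0, w, l, m => (w, l, m)
  | fuel+1, w, l, m =>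
    if cards.getD r 0 ∈ w then
      match PySem.Set.remove? w (cards.getD l 0) with
      | some w' => pvShrink cards r fuel w' (l+1) (pvMinOpt m ((r : Int) - (l : Int) + 1))
      | none => (w, l, m)
    else (w, l, m)

def pvStepA (cards : List Int) (st : PySem.Set Int × Nat × Option Int) (r : Nat) :
    PySem.Set Int × Nat × Option Int :=
  let res := pvShrink cards r (r + 1) st.1 st.2.1 st.2.2
  (PySem.Set.add res.1 (cards.getD r 0), res.2.1, res.2.2)

def least_consecutive_cards_to_match (cards : List Int) : Int :=
  let st := (List.range cards.length).foldl (pvStepA cards) (PySem.Set.empty, 0, none)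
  match st.2.2 with | some v => v | none => -1

-- ===== PORT B =====
def pvStepB (cards : List Int) (st : PySem.Dict Int Int × Option Int) (i : Nat) :
    PySem.Dict Int Int × Option Int :=
  let c := cards.getD i 0
  let best :=
    match st.1.get? c with
    | some p =>
      let gap := (i : Int) - p + 1
      match st.2 with
      | none => some gap
      | some b => if gap < b then some gap else some b
    | none => st.2
  (st.1.insert c (i : Int), best)

def least_consecutive_cards_to_match_alt (cards : List Int) : Int :=
  let st := (List.range cards.length).foldl (pvStepB cards) (PySem.Dict.empty, none)
  match st.2 with | some v => v | none => -1

-- ===== PRECONDITION & SPEC =====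
def Spec_least_consecutive_cards_to_match (cards : List Int) (out : Int) : Prop := out = least_consecutive_cards_to_match_alt cards
instance (cards : List Int) (out : Int) : Decidable (Spec_least_consecutive_cards_to_match cards out) := by unfold Spec_least_consecutive_cards_to_match; infer_instance

-- ===== CLAIM (what is proved, stated in full; the proofs are below) =====
def Claim_equal_least_consecutive_cards_to_match : Prop := ∀ (cards : List Int), Dom_least_consecutive_cards_to_match cards → Spec_least_consecutive_cards_to_match cards (least_consecutive_cards_to_match cards)

-- ===== LEMMAS AND PROOFS =====

-- the coupled invariant after processing the prefix of length n
def pvInv (cards : List Int) (n : Nat) (a : PySem.Set Int × Nat × Option Int)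
    (b : PySem.Dict Int Int × Option Int) : Prop :=
  a.2.1 ≤ n ∧
  a.1.Nodup ∧
  (∀ x, x ∈ a.1 ↔ ∃ i, a.2.1 ≤ i ∧ i < n ∧ cards.getD i 0 = x) ∧
  (∀ i j, a.2.1 ≤ i → i < j → j < n → cards.getD i 0 ≠ cards.getD j 0) ∧
  a.2.2 = b.2 ∧
  (∀ p, p < a.2.1 → ∃ v, a.2.2 = some v ∧ v ≤ (n : Int) - (p : Int)) ∧
  (∀ c p, b.1.get? c = some p →
     ∃ j : Nat, p = (j : Int) ∧ j < n ∧ cards.getD j 0 = c ∧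
       ∀ q, j < q → q < n → cards.getD q 0 ≠ c) ∧
  (∀ j, j < n → b.1.get? (cards.getD j 0) ≠ none)

theorem pvInv_zero (cards : List Int) :
    pvInv cards 0 (PySem.Set.empty, 0, none) (PySem.Dict.empty, none) := by
  refine ⟨le_refl _, List.nodup_nil, ?_, ?_, rfl, ?_, ?_, ?_⟩ <;>
    simp [PySem.Set.empty, PySem.Dict.get?_empty]

theorem pvMinOpt_minOpt (m : Option Int) (a b : Int) (h : b ≤ a) :
    pvMinOpt (pvMinOpt m a) b = pvMinOpt m b := by
  cases m <;> simp [pvMinOpt] <;> omega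

theorem pvShrink_not_mem (cards : List Int) (r fuel : Nat) (w : PySem.Set Int)
    (l : Nat) (m : Option Int) (h : cards.getD r 0 ∉ w) :
    pvShrink cards r fuel w l m = (w, l, m) := by
  cases fuel with
  | zero => rfl
  | succ k => rw [pvShrink, if_neg h]

theorem pvShrink_mem (cards : List Int) (r : Nat) :
    ∀ (fuel l : Nat) (w : PySem.Set Int) (m : Option Int) (p : Nat),
    (∀ x, x ∈ w ↔ ∃ i, l ≤ i ∧ i < r ∧ cards.getD i 0 = x) →
    w.Nodup →
    (∀ i j, l ≤ i → i < j → j < r → cards.getD i 0 ≠ cards.getD j 0) →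
    l ≤ p → p < r → cards.getD p 0 = cards.getD r 0 →
    p + 1 ≤ fuel + l →
    ∃ w', pvShrink cards r fuel w l m
            = (w', p + 1, pvMinOpt m ((r : Int) - (p : Int) + 1)) ∧
      w'.Nodup ∧
      (∀ x, x ∈ w' ↔ ∃ i, p + 1 ≤ i ∧ i < r ∧ cards.getD i 0 = x) := by
  intro fuel
  induction fuel with
  | zero =>
    intro l w m p _ _ _ hlp hpr _ hfuel
    omega
  | succ k ih =>
    intro l w m p hmem hnd hseg hlp hpr hgp hfuel
    have hlr : l < r := lt_of_le_of_lt hlp hpr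
    have hc : cards.getD r 0 ∈ w := (hmem _).2 ⟨p, hlp, hpr, hgp⟩
    have hl : cards.getD l 0 ∈ w := (hmem _).2 ⟨l, le_refl l, hlr, rfl⟩
    rw [pvShrink, if_pos hc, PySem.Set.remove?_of_mem hl]
    dsimp only
    have hw'nd : (w.discard (cards.getD l 0)).Nodup := PySem.Set.nodup_discard _ _ hnd
    have hw'mem : ∀ x, x ∈ w.discard (cards.getD l 0) ↔
        ∃ i, l + 1 ≤ i ∧ i < r ∧ cards.getD i 0 = x := by
      intro x
      rw [PySem.Set.mem_discard]
      constructor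
      · rintro ⟨hx, hne⟩
        obtain ⟨i, hli, hir, hgi⟩ := (hmem x).1 hx
        refine ⟨i, ?_, hir, hgi⟩
        rcases Nat.eq_or_lt_of_le hli with h | h
        · exact absurd (by rw [← h] at hgi; exact hgi.symm) hne
        · omega
      · rintro ⟨i, hli, hir, hgi⟩
        refine ⟨(hmem x).2 ⟨i, by omega, hir, hgi⟩, ?_⟩
        intro he
        exact hseg l i (le_refl l) (by omega) hir (by rw [hgi, ← he])
    rcases Nat.eq_or_lt_of_le hlp with heq | hlt
    · -- l = p: after this removal the loop exits
      subst heq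
      have hnotin : cards.getD r 0 ∉ w.discard (cards.getD l 0) := by
        intro hx
        obtain ⟨i, hli, hir, hgi⟩ := (hw'mem _).1 hx
        exact hseg l i (le_refl l) (by omega) hir (by rw [hgi, hgp])
      rw [pvShrink_not_mem cards r k _ _ _ hnotin]
      exact ⟨w.discard (cards.getD l 0), rfl, hw'nd, hw'mem⟩
    · -- l < p: recurse
      have hseg' : ∀ i j, l + 1 ≤ i → i < j → j < r →
          cards.getD i 0 ≠ cards.getD j 0 := fun i j hi hij hj =>
        hseg i j (by omega) hij hj
      obtain ⟨w'', heq, hnd'', hmem''⟩ :=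
        ih (l + 1) (w.discard (cards.getD l 0)) (pvMinOpt m ((r : Int) - (l : Int) + 1))
          p hw'mem hw'nd hseg' (by omega) hpr hgp (by omega)
      refine ⟨w'', ?_, hnd'', hmem''⟩
      rw [heq, pvMinOpt_minOpt _ _ _ (by omega)]

-- one processing step preserves the invariant
theorem pvInv_step (cards : List Int) (n : Nat) (a : PySem.Set Int × Nat × Option Int)
    (b : PySem.Dict Int Int × Option Int) (h : pvInv cards n a b) :
    pvInv cards (n + 1) (pvStepA cards a n) (pvStepB cards b n) := by
  obtain ⟨w, l, m⟩ := a
  obtain ⟨d, best⟩ := b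
  obtain ⟨h1, h2, h3, h4, h5, h6, h7, h8⟩ := h
  simp only at h1 h2 h3 h4 h5 h6 h7 h8
  rcases hg : d.get? (cards.getD n 0) with _ | p0
  · -- the value has never been seen
    have hnoocc : ∀ j, j < n → cards.getD j 0 ≠ cards.getD n 0 := by
      intro j hj he
      exact h8 j hj (by rw [he]; exact hg)
    have hcnotw : cards.getD n 0 ∉ w := by
      intro hc
      obtain ⟨i, _, hi2, hi3⟩ := (h3 _).1 hc
      exact hnoocc i hi2 hi3
    unfold pvStepA pvStepB
    rw [pvShrink_not_mem cards n (n + 1) w l m hcnotw]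
    simp only [hg]
    unfold pvInv
    dsimp only
    refine ⟨by omega, PySem.Set.nodup_add _ _ h2, ?_, ?_, h5, ?_, ?_, ?_⟩
    · intro x
      rw [PySem.Set.mem_add]
      constructor
      · rintro (hx | rfl)
        · obtain ⟨i, hi1, hi2, hi3⟩ := (h3 x).1 hx
          exact ⟨i, hi1, by omega, hi3⟩
        · exact ⟨n, h1, by omega, rfl⟩
      · rintro ⟨i, hi1, hi2, hi3⟩
        rcases Nat.lt_or_ge i n with hi | hi
        · exact Or.inl ((h3 x).2 ⟨i, hi1, hi, hi3⟩)
        · have : i = n := by omega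
          subst this; exact Or.inr hi3.symm
    · intro i j hi hij hj
      rcases Nat.lt_or_ge j n with hjn | hjn
      · exact h4 i j hi hij hjn
      · have : j = n := by omega
        subst this; exact hnoocc i hij
    · intro p hp
      obtain ⟨v, hv1, hv2⟩ := h6 p hp
      exact ⟨v, hv1, by push_cast; omega⟩
    · intro c p hget
      rw [PySem.Dict.get?_insert] at hget
      split_ifs at hget with hc
      · subst hc
        refine ⟨n, by injection hget with h; exact h.symm, by omega, rfl, ?_⟩
        intro q hq1 hq2; omega
      · obtain ⟨j, hj1, hj2, hj3, hj4⟩ := h7 c p hget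
        refine ⟨j, hj1, by omega, hj3, ?_⟩
        intro q hq1 hq2
        rcases Nat.lt_or_ge q n with hqn | hqn
        · exact hj4 q hq1 hqn
        · have : q = n := by omega
          subst this; intro he; exact hc (he ▸ rfl)
    · intro j hj
      rcases Nat.lt_or_ge j n with hjn | hjn
      · rw [PySem.Dict.get?_insert]
        split_ifs with hc
        · simp
        · exact h8 j hjn
      · have : j = n := by omega
        subst this
        rw [PySem.Dict.get?_insert_self]
        simp
  · -- the value was seen before, last at index j
    obtain ⟨j, hp0, hjn, hgj, hlast⟩ := h7 _ _ hg
    rcases Nat.lt_or_ge j l with hjl | hlj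
    · -- last occurrence is left of the window: A records nothing, B's gap loses
      have hcnotw : cards.getD n 0 ∉ w := by
        intro hc
        obtain ⟨i, hi1, hi2, hi3⟩ := (h3 _).1 hc
        rcases Nat.lt_or_ge j i with hji | hji
        · exact hlast i hji hi2 hi3
        · omega
      obtain ⟨v, hv1, hv2⟩ := h6 j hjl
      unfold pvStepA pvStepB
      rw [pvShrink_not_mem cards n (n + 1) w l m hcnotw]
      simp only [hg, ← h5, hv1, hp0]
      have hif : ¬ ((n : Int) - (j : Int) + 1 < v) := by omega
      rw [if_neg hif]
      unfold pvInv
      dsimp only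
      refine ⟨by omega, PySem.Set.nodup_add _ _ h2, ?_, ?_, rfl, ?_, ?_, ?_⟩
      · intro x
        rw [PySem.Set.mem_add]
        constructor
        · rintro (hx | rfl)
          · obtain ⟨i, hi1, hi2, hi3⟩ := (h3 x).1 hx
            exact ⟨i, hi1, by omega, hi3⟩
          · exact ⟨n, h1, by omega, rfl⟩
        · rintro ⟨i, hi1, hi2, hi3⟩
          rcases Nat.lt_or_ge i n with hi | hi
          · exact Or.inl ((h3 x).2 ⟨i, hi1, hi, hi3⟩)
          · have : i = n := by omega
            subst this; exact Or.inr hi3.symm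
      · intro i j' hi hij hj'
        rcases Nat.lt_or_ge j' n with hjn' | hjn'
        · exact h4 i j' hi hij hjn'
        · have : j' = n := by omega
          subst this
          exact hlast i (by omega) (by omega)
      · intro p hp
        obtain ⟨v', hv1', hv2'⟩ := h6 p hp
        rw [hv1] at hv1'
        injection hv1' with hvv
        refine ⟨v, rfl, ?_⟩
        rw [hvv]
        push_cast at hv2' ⊢
        omega
      · intro c p hget
        rw [PySem.Dict.get?_insert] at hget
        split_ifs at hget with hc
        · subst hc
          refine ⟨n, by injection hget with h; exact h.symm, by omega, rfl, ?_⟩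
          intro q hq1 hq2; omega
        · obtain ⟨j', hj1', hj2', hj3', hj4'⟩ := h7 c p hget
          refine ⟨j', hj1', by omega, hj3', ?_⟩
          intro q hq1 hq2
          rcases Nat.lt_or_ge q n with hqn | hqn
          · exact hj4' q hq1 hqn
          · have : q = n := by omega
            subst this; intro he; exact hc (he ▸ rfl)
      · intro j' hj'
        rcases Nat.lt_or_ge j' n with hjn' | hjn'
        · rw [PySem.Dict.get?_insert]
          split_ifs with hc
          · simp
          · exact h8 j' hjn'
        · have : j' = n := by omega
          subst this
          rw [PySem.Dict.get?_insert_self]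
          simp
    · -- last occurrence inside the window: A shrinks to j+1, both record n-j+1
      obtain ⟨w', hweq, hwnd, hwmem⟩ :=
        pvShrink_mem cards n (n + 1) l w m j h3 h2 h4 hlj hjn hgj (by omega)
      have hcnotw' : cards.getD n 0 ∉ w' := by
        intro hc
        obtain ⟨i, hi1, hi2, hi3⟩ := (hwmem _).1 hc
        exact hlast i (by omega) hi2 hi3
      unfold pvStepA pvStepB
      rw [hweq]
      simp only [hg, ← h5, hp0]
      unfold pvInv
      dsimp only
      refine ⟨by omega, PySem.Set.nodup_add _ _ hwnd, ?_, ?_, ?_, ?_, ?_, ?_⟩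
      · intro x
        rw [PySem.Set.mem_add]
        constructor
        · rintro (hx | rfl)
          · obtain ⟨i, hi1, hi2, hi3⟩ := (hwmem x).1 hx
            exact ⟨i, hi1, by omega, hi3⟩
          · exact ⟨n, by omega, by omega, rfl⟩
        · rintro ⟨i, hi1, hi2, hi3⟩
          rcases Nat.lt_or_ge i n with hi | hi
          · exact Or.inl ((hwmem x).2 ⟨i, hi1, hi, hi3⟩)
          · have : i = n := by omega
            subst this; exact Or.inr hi3.symm
      · intro i j' hi hij hj'
        rcases Nat.lt_or_ge j' n with hjn' | hjn'
        · exact h4 i j' (by omega) hij hjn'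
        · have : j' = n := by omega
          subst this
          exact hlast i (by omega) (by omega)
      · cases m with
        | none => rfl
        | some b =>
          dsimp only [pvMinOpt]
          split_ifs with hb
          · congr 1; omega
          · congr 1; omega
      · intro p hp
        refine ⟨(pvMinOpt m ((n : Int) - (j : Int) + 1)).getD 0, ?_, ?_⟩
        · cases m <;> rfl
        · cases m with
          | none => simp only [pvMinOpt, Option.getD_some]; push_cast; omega
          | some b =>
            rcases Nat.lt_or_ge p l with hpl | hpl
            · obtain ⟨v', hv1', hv2'⟩ := h6 p hpl
              injection hv1' with hv1'
              subst hv1'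
              simp only [pvMinOpt, Option.getD_some]
              push_cast at hv2' ⊢
              omega
            · simp only [pvMinOpt, Option.getD_some]
              push_cast
              omega
      · intro c p hget
        rw [PySem.Dict.get?_insert] at hget
        split_ifs at hget with hc
        · subst hc
          refine ⟨n, by injection hget with h; exact h.symm, by omega, rfl, ?_⟩
          intro q hq1 hq2; omega
        · obtain ⟨j', hj1', hj2', hj3', hj4'⟩ := h7 c p hget
          refine ⟨j', hj1', by omega, hj3', ?_⟩
          intro q hq1 hq2
          rcases Nat.lt_or_ge q n with hqn | hqn
          · exact hj4' q hq1 hqn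
          · have : q = n := by omega
            subst this; intro he; exact hc (he ▸ rfl)
      · intro j' hj'
        rcases Nat.lt_or_ge j' n with hjn' | hjn'
        · rw [PySem.Dict.get?_insert]
          split_ifs with hc
          · simp
          · exact h8 j' hjn'
        · have : j' = n := by omega
          subst this
          rw [PySem.Dict.get?_insert_self]
          simp

theorem pvInv_all (cards : List Int) (n : Nat) :
    pvInv cards n ((List.range n).foldl (pvStepA cards) (PySem.Set.empty, 0, none))
      ((List.range n).foldl (pvStepB cards) (PySem.Dict.empty, none)) := by
  induction n with
  | zero => simpa using pvInv_zero cards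
  | succ k ih =>
    rw [List.range_succ, List.foldl_append, List.foldl_append]
    simpa using pvInv_step cards k _ _ ih

-- ===== VERDICT (by name: the statement is the Claim_ definition above) =====
theorem least_consecutive_cards_to_match_spec : Claim_equal_least_consecutive_cards_to_match := by
  intro cards _
  unfold Spec_least_consecutive_cards_to_match
  unfold least_consecutive_cards_to_match least_consecutive_cards_to_match_alt
  have h := (pvInv_all cards cards.length).2.2.2.2.1
  simp only []
  rw [h]
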